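-- pv_equiv track=rewrite | github.com/jordeu/gendas | gendas/tabix/index.py | _reg2bins
-- ===== SOURCE A (Python) =====
-- def _reg2bins(beg, _end):
--
--     bins = []
--     end = _end
--
--     if beg >= end:
--         return bins
--
--     if end >= 1 << 29:
--         end = 1 << 29
--
--     end -= 1
--     bins.append(0)
--
--     k = 1 + (beg >> 26)
--     while k <= 1 + (end >> 26):
--         bins.append(k)
--         k += 1
--
--     k = 9 + (beg >> 23)
--     while k <= 9 + (end >> 23):
--         bins.append(k)
--         k += 1
--
--     k = 73 + (beg >> 20)
--     while k <= 73 + (end >> 20):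
--         bins.append(k)
--         k += 1
--
--     k = 585 + (beg >> 17)
--     while k <= 585 + (end >> 17):
--         bins.append(k)
--         k += 1
--
--     k = 4681 + (beg >> 14)
--     while k <= 4681 + (end >> 14):
--         bins.append(k)
--         k += 1
--
--     return bins
-- ===== SOURCE B (Python) =====
-- def _reg2bins(beg, _end):
--     if beg >= _end:
--         return []
--     end = min(_end, 1 << 29) - 1
--
--     def descend(lo, hi, shift):
--         # lo/hi are the first/last overlapping bin of the current level;
--         # descend to the next level via the bin tree's child rule (children
--         # of bin k are 8*k+1 .. 8*k+8) instead of per-level offset tables.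
--         if shift == 14:
--             return []
--         s = shift - 3
--         lo2 = lo * 8 + 1 + ((beg >> s) % 8)
--         hi2 = hi * 8 + 1 + ((end >> s) % 8)
--         return list(range(lo2, hi2 + 1)) + descend(lo2, hi2, s)
--
--     return [0] + descend(beg >> 29, end >> 29, 29)
-- ===== Notes on version B (the rewrite author's own statement) =====
-- stated objective: alternative
-- what changed: Replaces A's five independent while-loops over per-level offset tables (1,9,73,585,4681 plus full-width shifts of beg/end) by a recursive descent of the bin tree: each level's first/last overlapping bin is derived from the previous level's via the child rule k -> 8*k+1+((pos>>shift)%8), so no offset constants and only the 3 low bits of each shift are used per level.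
import Mathlib
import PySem

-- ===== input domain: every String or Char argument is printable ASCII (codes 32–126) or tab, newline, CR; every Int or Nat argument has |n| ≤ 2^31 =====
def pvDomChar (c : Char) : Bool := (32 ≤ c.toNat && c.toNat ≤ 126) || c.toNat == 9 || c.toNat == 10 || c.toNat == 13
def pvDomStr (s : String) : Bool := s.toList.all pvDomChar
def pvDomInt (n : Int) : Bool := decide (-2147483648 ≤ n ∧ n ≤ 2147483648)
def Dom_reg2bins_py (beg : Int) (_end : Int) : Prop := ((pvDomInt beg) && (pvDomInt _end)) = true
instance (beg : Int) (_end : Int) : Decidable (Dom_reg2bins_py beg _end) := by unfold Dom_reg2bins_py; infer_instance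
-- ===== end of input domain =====

-- B replaces A's five independent offset-table while-loops by a recursive descent of the
-- bin tree, deriving each level's first/last bin from the previous level's via the
-- 8*k+1 child rule (objective: alternative).


-- ===== PORT A =====
-- A's 'k = lo; while k <= hi: bins.append(k); k += 1' loop, step for step
def reg2binsWhile (k hi : Int) : List Int :=
  if k ≤ hi then k :: reg2binsWhile (k + 1) hi else []
termination_by (hi + 1 - k).toNat
decreasing_by omega

def reg2bins_py (beg : Int) (_end : Int) : List Int :=
  let bins : List Int := []
  let end0 := _end
  if beg ≥ end0 then bins
  else
    let end1 := if end0 ≥ (1 <<< 29 : Int) then ((1 : Int) <<< 29) else end0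
    let end2 := end1 - 1
    let bins := bins ++ [0]
    let bins := bins ++ reg2binsWhile (1 + (beg >>> (26:Nat))) (1 + (end2 >>> (26:Nat)))
    let bins := bins ++ reg2binsWhile (9 + (beg >>> (23:Nat))) (9 + (end2 >>> (23:Nat)))
    let bins := bins ++ reg2binsWhile (73 + (beg >>> (20:Nat))) (73 + (end2 >>> (20:Nat)))
    let bins := bins ++ reg2binsWhile (585 + (beg >>> (17:Nat))) (585 + (end2 >>> (17:Nat)))
    let bins := bins ++ reg2binsWhile (4681 + (beg >>> (14:Nat))) (4681 + (end2 >>> (14:Nat)))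
    bins

-- ===== PORT B =====
-- Source B's inner 'descend(lo, hi, shift)': lo/hi are the first/last overlapping bin of the
-- current level; children of bin k are 8*k+1 .. 8*k+8.  Python's 'if shift == 14' stop test
-- is written 'shift ≤ 14' for termination; on every reachable call (shift ∈ {29,26,23,20,17,14})
-- the two tests coincide.  '% 8' is Python mod = PySem.Int.mod.
def descendB (beg e : Int) (lo hi : Int) (shift : Nat) : List Int :=
  if shift ≤ 14 then []
  else
    let s := shift - 3
    let lo2 := lo * 8 + 1 + PySem.Int.mod (beg >>> s) 8
    let hi2 := hi * 8 + 1 + PySem.Int.mod (e >>> s) 8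
    PySem.List.pyRange lo2 (hi2 + 1) 1 ++ descendB beg e lo2 hi2 s
termination_by shift
decreasing_by omega

def reg2bins_py_alt (beg : Int) (_end : Int) : List Int :=
  if beg ≥ _end then []
  else
    let e := min _end ((1 : Int) <<< 29) - 1
    [0] ++ descendB beg e (beg >>> (29:Nat)) (e >>> (29:Nat)) 29

-- ===== PRECONDITION & SPEC =====
def Spec_reg2bins_py (beg : Int) (_end : Int) (out : List Int) : Prop := out = reg2bins_py_alt beg _end
instance (beg : Int) (_end : Int) (out : List Int) : Decidable (Spec_reg2bins_py beg _end out) := by unfold Spec_reg2bins_py; infer_instance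

-- ===== CLAIM =====
def Claim_equal_reg2bins_py : Prop := ∀ (beg : Int) (_end : Int), Dom_reg2bins_py beg _end → Spec_reg2bins_py beg _end (reg2bins_py beg _end)

-- ===== LEMMAS AND PROOFS =====
-- A's while-append loop is exactly Python's range(k, hi+1)
theorem reg2binsWhile_eq_pyRange (k hi : Int) :
    reg2binsWhile k hi = PySem.List.pyRange k (hi + 1) 1 := by
  unfold reg2binsWhile
  split
  · rw [PySem.List.pyRange_one_cons (by omega), reg2binsWhile_eq_pyRange]
  · rw [PySem.List.pyRange_one_eq_nil (by omega)]
termination_by (hi + 1 - k).toNat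
decreasing_by omega

-- the tree's child rule recovers the next level's shift: (x>>(s+3))*8 + ((x>>s) mod 8) = x>>s
theorem shift3 (x : Int) (s t : Nat) (ht : t = s + 3) :
    (x >>> t) * 8 + (x >>> s) % 8 = x >>> s := by
  subst ht
  rw [Int.shiftRight_eq_div_pow, Int.shiftRight_eq_div_pow, pow_add]
  have h : x / ((2:Int) ^ s * 8) = (x / (2:Int) ^ s) / 8 := by
    rw [Int.ediv_ediv_of_nonneg (by positivity)]
  push_cast
  rw [h]
  omega

-- ===== VERDICT =====
theorem reg2bins_py_spec : Claim_equal_reg2bins_py := by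
  intro beg _end _
  unfold Spec_reg2bins_py reg2bins_py reg2bins_py_alt
  by_cases hb : _end ≤ beg
  · simp [hb]
  · have hmin : min _end ((1 : Int) <<< 29) =
        (if _end ≥ (1 <<< 29 : Int) then ((1 : Int) <<< 29) else _end) := by
      split
      · exact min_eq_right ‹_›
      · exact min_eq_left ((not_le.mp ‹_›).le)
    set e := (if _end ≥ (1 <<< 29 : Int) then ((1 : Int) <<< 29) else _end) - 1 with he
    have h1b : beg >>> (29:Nat) * 8 + 1 + beg >>> (26:Nat) % 8
        = 1 + beg >>> (26:Nat) := by have := shift3 beg 26 29 rfl; omega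
    have h1e : e >>> (29:Nat) * 8 + 1 + e >>> (26:Nat) % 8
        = 1 + e >>> (26:Nat) := by have := shift3 e 26 29 rfl; omega
    have h2b : (1 + beg >>> (26:Nat)) * 8 + 1 + beg >>> (23:Nat) % 8
        = 9 + beg >>> (23:Nat) := by have := shift3 beg 23 26 rfl; omega
    have h2e : (1 + e >>> (26:Nat)) * 8 + 1 + e >>> (23:Nat) % 8
        = 9 + e >>> (23:Nat) := by have := shift3 e 23 26 rfl; omega
    have h3b : (9 + beg >>> (23:Nat)) * 8 + 1 + beg >>> (20:Nat) % 8
        = 73 + beg >>> (20:Nat) := by have := shift3 beg 20 23 rfl; omega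
    have h3e : (9 + e >>> (23:Nat)) * 8 + 1 + e >>> (20:Nat) % 8
        = 73 + e >>> (20:Nat) := by have := shift3 e 20 23 rfl; omega
    have h4b : (73 + beg >>> (20:Nat)) * 8 + 1 + beg >>> (17:Nat) % 8
        = 585 + beg >>> (17:Nat) := by have := shift3 beg 17 20 rfl; omega
    have h4e : (73 + e >>> (20:Nat)) * 8 + 1 + e >>> (17:Nat) % 8
        = 585 + e >>> (17:Nat) := by have := shift3 e 17 20 rfl; omega
    have h5b : (585 + beg >>> (17:Nat)) * 8 + 1 + beg >>> (14:Nat) % 8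
        = 4681 + beg >>> (14:Nat) := by have := shift3 beg 14 17 rfl; omega
    have h5e : (585 + e >>> (17:Nat)) * 8 + 1 + e >>> (14:Nat) % 8
        = 4681 + e >>> (14:Nat) := by have := shift3 e 14 17 rfl; omega
    simp only [ge_iff_le, if_neg hb, reg2binsWhile_eq_pyRange, hmin, ← he,
      List.append_assoc, List.nil_append]
    rw [descendB]; norm_num; rw [h1b, h1e]
    rw [descendB]; norm_num; rw [h2b, h2e]
    rw [descendB]; norm_num; rw [h3b, h3e]
    rw [descendB]; norm_num; rw [h4b, h4e]
    rw [descendB]; norm_num; rw [h5b, h5e]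
    rw [descendB]
    simp
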